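-- pv_equiv track=rewrite | github.com/Bmoist/ChordSense | util/music_util.py | transpose_chord_seq
-- ===== SOURCE A (Python) =====
-- pitch_names = ['Fb', 'Cb', 'Gb', 'Db', 'Ab', 'Eb', 'Bb', 'F',
--                'C',
--                'G', 'D', 'A', 'E', 'B', 'F#', 'C#', 'G#']
--
-- pitch_name_scale = ['C', 'Db', 'D', 'Eb', 'E', 'F', 'F#', 'G', 'Ab', 'A', 'Bb', 'B']
--
-- def standardize_pitch_name(name):
--     if name in pitch_names:
--         return name
--     elif name == 'N' or name == 'X':
--         return 'N'
--     else:
--         root = name[0]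
--         n_mods = len(name) - 1
--         if 'b' in name:
--             assert '#' not in name
--             new_idx = (pitch_name_scale.index(root) - n_mods) % len(pitch_name_scale)
--             return pitch_name_scale[new_idx]
--         elif '#' in name:
--             assert 'b' not in name
--             new_idx = (pitch_name_scale.index(root) + n_mods) % len(pitch_name_scale)
--             return pitch_name_scale[new_idx]
--         else:
--             raise Exception("Unknown accidental notation")
--
-- def format_chord_symbol_preliminary(symbol):
--     if ":" not in symbol:
--         if symbol == 'N' or symbol == 'X':
--             return 'N'
--         elif '/' in symbol:
--             tmp = symbol.rsplit('/')
--             return tmp[0] + ':maj/' + tmp[1]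
--         else:
--             return symbol + ':maj'
--     else:
--         return symbol
--
-- def transpose_chord_seq(chord_list):
--     """
--     @param chord_list: list of Harte notations
--     """
--     assert type(chord_list) == list
--     mod_chord_seq = []
--     for i in range(17):
--         # for i in range(1):
--         mod_chords = []
--         # Loop through all the 16 keys (including enharmonics)
--         for e in chord_list:
--             if e == '[cls]':
--                 raise Exception("No cls!")
--             symbol = format_chord_symbol_preliminary(e)
--             # symbol = Harte(e).prettify()
--             if symbol == 'N':
--                 continue  # skip N for now
--                 # mod_chords.append(e)
--             elif ':' not in symbol:
--                 raise Exception("Unknown chord symbol: {}!".format(symbol))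
--             root = symbol.split(':')[0]
--             mod_root = modulate_pitch(root, i)
--             mod_chords.append(mod_root + ':' + symbol.split(':')[-1])
--         mod_chord_seq.append(mod_chords)
--     return mod_chord_seq
--
-- def modulate_pitch(pitch_name, k):
--     assert k >= 0
--     # Find the index of the input pitch in the circle
--     pitch_name = standardize_pitch_name(pitch_name)
--     try:
--         pitch_index = pitch_names.index(pitch_name)
--     except ValueError:
--         raise ValueError(
--             "Invalid pitch name {}. Please provide a valid pitch name from the circle of fifths.".format(pitch_name))
--
--     # Calculate the new index after modulation
--     if pitch_index + k >= len(pitch_names):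
--         pitch_index += 5 * ((pitch_index + k) // 12)  # a very nasty hotfix to fix transposition by circle of fifth
--     new_index = (pitch_index + k) % len(pitch_names)
--
--     # Return the modulated pitch name
--     return pitch_names[new_index]
-- ===== SOURCE B (Python) =====
-- pitch_names = ['Fb', 'Cb', 'Gb', 'Db', 'Ab', 'Eb', 'Bb', 'F',
--                'C',
--                'G', 'D', 'A', 'E', 'B', 'F#', 'C#', 'G#']
--
-- pitch_name_scale = ['C', 'Db', 'D', 'Eb', 'E', 'F', 'F#', 'G', 'Ab', 'A', 'Bb', 'B']
--
--
-- def standardize_pitch_name(name):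
--     if name in pitch_names:
--         return name
--     elif name == 'N' or name == 'X':
--         return 'N'
--     else:
--         root = name[0]
--         n_mods = len(name) - 1
--         if 'b' in name:
--             assert '#' not in name
--             new_idx = (pitch_name_scale.index(root) - n_mods) % len(pitch_name_scale)
--             return pitch_name_scale[new_idx]
--         elif '#' in name:
--             assert 'b' not in name
--             new_idx = (pitch_name_scale.index(root) + n_mods) % len(pitch_name_scale)
--             return pitch_name_scale[new_idx]
--         else:
--             raise Exception("Unknown accidental notation")
--
--
-- def format_chord_symbol_preliminary(symbol):
--     if ":" not in symbol:
--         if symbol == 'N' or symbol == 'X':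
--             return 'N'
--         elif '/' in symbol:
--             tmp = symbol.rsplit('/')
--             return tmp[0] + ':maj/' + tmp[1]
--         else:
--             return symbol + ':maj'
--     else:
--         return symbol
--
--
-- def transpose_chord_seq(chord_list):
--     """Parse each chord once into (circle-of-fifths index, suffix); then emit the
--     17 transposed rows by pure index arithmetic, with no re-parsing per key."""
--     assert type(chord_list) == list
--     parsed = []
--     for e in chord_list:
--         if e == '[cls]':
--             raise Exception("No cls!")
--         symbol = format_chord_symbol_preliminary(e)
--         if symbol == 'N':
--             continue
--         parts = symbol.split(':')
--         idx = pitch_names.index(standardize_pitch_name(parts[0]))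
--         parsed.append((idx, parts[-1]))
--     return [[_shift_name(idx, k) + ':' + suffix for idx, suffix in parsed]
--             for k in range(17)]
--
--
-- def _shift_name(idx, k):
--     if idx + k >= 17:
--         idx += 5 * ((idx + k) // 12)
--     return pitch_names[(idx + k) % 17]
-- ===== Notes on version B (the rewrite author's own statement) =====
-- stated objective: faster
-- what changed: B parses and standardizes each chord once into a (circle-of-fifths index, suffix) table and then produces the 17 transposed rows by pure index arithmetic, instead of A's re-formatting, re-splitting and re-standardizing every chord for each of the 17 keys.
import Mathlib
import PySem

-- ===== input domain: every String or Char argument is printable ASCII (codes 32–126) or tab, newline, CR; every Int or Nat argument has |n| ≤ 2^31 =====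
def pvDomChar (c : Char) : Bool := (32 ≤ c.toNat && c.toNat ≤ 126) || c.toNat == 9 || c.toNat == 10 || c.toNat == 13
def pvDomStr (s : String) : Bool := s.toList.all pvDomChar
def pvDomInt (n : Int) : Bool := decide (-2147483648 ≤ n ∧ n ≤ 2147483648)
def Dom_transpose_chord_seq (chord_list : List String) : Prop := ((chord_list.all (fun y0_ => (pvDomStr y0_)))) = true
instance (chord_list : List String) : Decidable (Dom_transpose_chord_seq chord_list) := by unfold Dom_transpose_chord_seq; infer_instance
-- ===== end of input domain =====

-- B parses each chord once into (circle-of-fifths index, suffix) and then emits the 17 rows by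
-- index arithmetic, instead of A's re-parsing of every chord for each of the 17 keys
-- (objective: faster by a constant factor; return value only, no mutation involved).

-- ===== PORT A =====
-- module constants, as lists of code points (exact on the ASCII domain)
def pvPitchNames : List (List Char) :=
  [['F','b'], ['C','b'], ['G','b'], ['D','b'], ['A','b'], ['E','b'], ['B','b'], ['F'],
   ['C'],
   ['G'], ['D'], ['A'], ['E'], ['B'], ['F','#'], ['C','#'], ['G','#']]

def pvScale : List (List Char) :=
  [['C'], ['D','b'], ['D'], ['E','b'], ['E'], ['F'], ['F','#'], ['G'], ['A','b'], ['A'], ['B','b'], ['B']]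

-- standardize_pitch_name; none = the Exception / AssertionError / ValueError paths
def pvStd? (name : List Char) : Option (List Char) :=
  if name ∈ pvPitchNames then some name
  else if name = ['N'] ∨ name = ['X'] then some ['N']
  else
    match name with
    | [] => none                                   -- name[0] raises IndexError
    | c :: _ =>
      let n_mods : Int := (name.length : Int) - 1
      if PySem.Chars.isIn ['b'] name then
        if PySem.Chars.isIn ['#'] name then none   -- assert '#' not in name
        else (PySem.List.index? pvScale [c]).bind fun i =>
          pvScale[(PySem.Int.mod ((i : Int) - n_mods) 12).toNat]?
      else if PySem.Chars.isIn ['#'] name then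
        (PySem.List.index? pvScale [c]).bind fun i =>
          pvScale[(PySem.Int.mod ((i : Int) + n_mods) 12).toNat]?
      else none                                    -- raise "Unknown accidental notation"

-- format_chord_symbol_preliminary
def pvFmt (symbol : List Char) : List Char :=
  if ¬ (PySem.Chars.isIn [':'] symbol = true) then
    if symbol = ['N'] ∨ symbol = ['X'] then ['N']
    else if PySem.Chars.isIn ['/'] symbol then
      let tmp := PySem.Chars.splitOn symbol ['/']   -- rsplit('/') with no maxsplit = split('/')
      tmp.headD [] ++ [':','m','a','j','/'] ++ tmp[1]?.getD []
    else symbol ++ [':','m','a','j']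
  else symbol

-- the index arithmetic at the end of modulate_pitch (shared text of both Pythons)
def pvShift (idx k : Int) : List Char :=
  let idx' := if idx + k ≥ 17 then idx + 5 * PySem.Int.floordiv (idx + k) 12 else idx
  (pvPitchNames[(PySem.Int.mod (idx' + k) 17).toNat]?).getD []

-- modulate_pitch; none = a raise inside it (propagated out of transpose_chord_seq)
def pvModulate? (pitch_name : List Char) (k : Int) : Option (List Char) :=
  (pvStd? pitch_name).bind fun n =>
    (PySem.List.index? pvPitchNames n).map fun i => pvShift (i : Int) k

-- one iteration of A's inner loop: none = raise, some none = 'continue', some (some c) = append c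
def pvStepA (k : Int) (e : List Char) : Option (Option (List Char)) :=
  if e = ['[','c','l','s',']'] then none
  else
    let symbol := pvFmt e
    if symbol = ['N'] then some none
    else if ¬ (PySem.Chars.isIn [':'] symbol = true) then none
    else
      let parts := PySem.Chars.splitOn symbol [':']
      (pvModulate? (parts.headD []) k).map fun m => some (m ++ ':' :: (parts.getLast?.getD []))

-- A's inner loop over chord_list (building mod_chords)
def pvRowA (k : Int) : List (List Char) → Option (List (List Char))
  | [] => some []
  | e :: rest =>
    match pvStepA k e with
    | none => none
    | some none => pvRowA k rest
    | some (some c) => (pvRowA k rest).map (c :: ·)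

-- A's outer loop over range(17) (building mod_chord_seq)
def pvRowsA (l : List (List Char)) : List Int → Option (List (List (List Char)))
  | [] => some []
  | k :: ks =>
    match pvRowA k l with
    | none => none
    | some r => (pvRowsA l ks).map (r :: ·)

def transpose_chord_seq (chord_list : List String) : List (List String) :=
  match pvRowsA (chord_list.map String.toList) (PySem.List.pyRange 0 17 1) with
  | none => []                                      -- a raise in the Python; outside Pre_
  | some rows => rows.map (fun row => row.map String.ofList)

-- ===== PORT B =====
-- one iteration of B's single parsing pass: (pitch_names index of the standardized root, suffix)
def pvStepB (e : List Char) : Option (Option (Int × List Char)) :=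
  if e = ['[','c','l','s',']'] then none
  else
    let symbol := pvFmt e
    if symbol = ['N'] then some none
    else if ¬ (PySem.Chars.isIn [':'] symbol = true) then none
    else
      let parts := PySem.Chars.splitOn symbol [':']
      (pvStd? (parts.headD [])).bind fun n =>
        (PySem.List.index? pvPitchNames n).map fun i =>
          some ((i : Int), parts.getLast?.getD [])

-- B's parsing pass over chord_list
def pvParseB : List (List Char) → Option (List (Int × List Char))
  | [] => some []
  | e :: rest =>
    match pvStepB e with
    | none => none
    | some none => pvParseB rest
    | some (some p) => (pvParseB rest).map (p :: ·)

def transpose_chord_seq_alt (chord_list : List String) : List (List String) :=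
  match pvParseB (chord_list.map String.toList) with
  | none => []                                      -- a raise in the Python; outside Pre_
  | some parsed =>
    (PySem.List.pyRange 0 17 1).map fun k =>
      parsed.map fun p => String.ofList (pvShift p.1 k ++ ':' :: p.2)

-- ===== PRECONDITION & SPEC =====
-- Pre_ excludes exactly the inputs on which the Python raises: a '[cls]' entry, or a chord whose
-- root (after the preliminary formatting) is not a valid pitch name (standardizes to 'N', is empty,
-- mixes 'b' and '#', has no accidental and is unknown, or has a letter outside the scale).
def pvValidRoot (r : List Char) : Prop :=
  r ∈ pvPitchNames ∨
    (r ≠ ['N'] ∧ r ≠ ['X'] ∧ r ≠ [] ∧ [r.headD ' '] ∈ pvScale ∧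
      ((PySem.Chars.isIn ['b'] r = true ∧ PySem.Chars.isIn ['#'] r = false) ∨
       (PySem.Chars.isIn ['#'] r = true ∧ PySem.Chars.isIn ['b'] r = false)))

def pvGoodChord (e : List Char) : Prop :=
  e ≠ ['[','c','l','s',']'] ∧
    (pvFmt e = ['N'] ∨ pvValidRoot ((PySem.Chars.splitOn (pvFmt e) [':']).headD []))

def Pre_transpose_chord_seq (chord_list : List String) : Prop :=
  ∀ e ∈ chord_list, pvGoodChord e.toList

instance (chord_list : List String) : Decidable (Pre_transpose_chord_seq chord_list) := by
  unfold Pre_transpose_chord_seq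
  have : DecidablePred pvGoodChord := by
    intro e; unfold pvGoodChord pvValidRoot; infer_instance
  infer_instance

def pvWitness_transpose_chord_seq : List String := ["C:min7", "N", "G/B", "Dbb", "F#"]

def Spec_transpose_chord_seq (chord_list : List String) (out : List (List String)) : Prop := out = transpose_chord_seq_alt chord_list
instance (chord_list : List String) (out : List (List String)) : Decidable (Spec_transpose_chord_seq chord_list out) := by unfold Spec_transpose_chord_seq; infer_instance

-- ===== CLAIM (what is proved, stated in full; the proofs are below) =====
def Claim_equal_transpose_chord_seq : Prop := ∀ (chord_list : List String), Dom_transpose_chord_seq chord_list → Pre_transpose_chord_seq chord_list → Spec_transpose_chord_seq chord_list (transpose_chord_seq chord_list)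

-- ===== LEMMAS AND PROOFS =====

-- one element: A's step is B's step with the key-k shift applied
theorem pvStepA_eq (k : Int) (e : List Char) :
    pvStepA k e = (pvStepB e).map (Option.map fun p => pvShift p.1 k ++ ':' :: p.2) := by
  by_cases h1 : e = ['[', 'c', 'l', 's', ']']
  · simp [pvStepA, pvStepB, h1]
  · by_cases h2 : pvFmt e = ['N']
    · simp [pvStepA, pvStepB, h1, h2]
    · by_cases h3 : PySem.Chars.isIn [':'] (pvFmt e) = true
      · simp [pvStepA, pvStepB, pvModulate?, h1, h2, h3]
      · simp [pvStepA, pvStepB, h1, h2, h3]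

-- one row: A's inner loop is B's parsed table mapped through the shift
theorem pvRowA_eq (k : Int) (l : List (List Char)) :
    pvRowA k l = (pvParseB l).map (List.map fun p => pvShift p.1 k ++ ':' :: p.2) := by
  induction l with
  | nil => rfl
  | cons e rest ih =>
    unfold pvRowA pvParseB
    rw [pvStepA_eq]
    cases hs : pvStepB e with
    | none => rfl
    | some o =>
      cases o with
      | none => simpa using ih
      | some p =>
        cases hp : pvParseB rest with
        | none => simp [ih, hp]
        | some ps => simp [ih, hp]

-- all rows, for any list of keys
theorem pvRowsA_eq (l : List (List Char)) (ks : List Int) (ps : List (Int × List Char))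
    (h : pvParseB l = some ps) :
    pvRowsA l ks = some (ks.map fun k => ps.map fun p => pvShift p.1 k ++ ':' :: p.2) := by
  induction ks with
  | nil => rfl
  | cons k ks ih =>
    unfold pvRowsA
    rw [pvRowA_eq, h, ih]
    rfl

theorem pvRowsA_none (l : List (List Char)) (k : Int) (ks : List Int)
    (h : pvParseB l = none) : pvRowsA l (k :: ks) = none := by
  unfold pvRowsA
  rw [pvRowA_eq, h]
  rfl

-- ===== VERDICT (by name: the statement is the Claim_ definition above) =====
theorem transpose_chord_seq_spec : Claim_equal_transpose_chord_seq := by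
  intro chord_list _ _
  unfold Spec_transpose_chord_seq transpose_chord_seq transpose_chord_seq_alt
  cases h : pvParseB (chord_list.map String.toList) with
  | none =>
    have hr : PySem.List.pyRange 0 17 1 =
        ([0, 1, 2, 3, 4, 5, 6, 7, 8, 9, 10, 11, 12, 13, 14, 15, 16] : List Int) := by decide
    rw [hr, pvRowsA_none _ _ _ h]
  | some ps =>
    rw [pvRowsA_eq _ _ _ h]
    simp [List.map_map, Function.comp]
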